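-- pv_equiv track=rewrite | github.com/lbl-cbg/t5-commons | data_management/jamo/jat/src/jat/analysis.py | eval_string
-- ===== SOURCE A (Python) =====
-- def eval_string(string, template):
--     '''
--     string: string to evaluate - this could contain a macro construct such as {metadata.subtitle}
--     template: metadata to expand macros with
--     '''
--     ret = u''
--     inB = False
--     key = ''
--     for char in string:
--         if char == '{' and not inB:
--             inB = True
--         elif char == '}' and inB:
--             tVal = get_value(template, key)
--             if tVal is not None and isinstance(tVal, list):
--                 tVal = ','.join(map(str, tVal))
--             ret += str(tVal)
--             key = ''
--             inB = False
--         elif inB: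
--             key += char
--         else:
--             ret += char
--     return ret
--
-- def get_value(metadata, keys):
--     on = metadata
--     for key in keys.split('.'):
--         if key not in on:
--             return ''
--         if isinstance(on[key], dict):
--             on = on[key]
--         else:
--             return on[key]
-- ===== SOURCE B (Python) =====
-- def eval_string(string, template):
--     '''
--     string: string to evaluate - this could contain a macro construct such as {metadata.subtitle}
--     template: metadata to expand macros with
--     '''
--     out = []
--     rest = string
--     while True:
--         lit, brace, rest = rest.partition('{')
--         out.append(lit)
--         if not brace:
--             break
--         key, close, rest = rest.partition('}')
--         if not close:
--             break
--         val = get_value(template, key)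
--         if val is not None and isinstance(val, list):
--             val = ','.join(map(str, val))
--         out.append(str(val))
--     return ''.join(out)
--
-- def get_value(metadata, keys):
--     on = metadata
--     for key in keys.split('.'):
--         if key not in on:
--             return ''
--         if isinstance(on[key], dict):
--             on = on[key]
--         else:
--             return on[key]
-- ===== Notes on version B (the rewrite author's own statement) =====
-- stated objective: faster
-- what changed: Replaces A's per-character state machine (inB flag, char-by-char ret/key accumulation via string +=) with a chunk loop that repeatedly str.partition's on '{' and '}' and joins the collected pieces; chunk-level C string operations and a single join replace the per-character Python loop with repeated concatenation.
import Mathlib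
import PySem

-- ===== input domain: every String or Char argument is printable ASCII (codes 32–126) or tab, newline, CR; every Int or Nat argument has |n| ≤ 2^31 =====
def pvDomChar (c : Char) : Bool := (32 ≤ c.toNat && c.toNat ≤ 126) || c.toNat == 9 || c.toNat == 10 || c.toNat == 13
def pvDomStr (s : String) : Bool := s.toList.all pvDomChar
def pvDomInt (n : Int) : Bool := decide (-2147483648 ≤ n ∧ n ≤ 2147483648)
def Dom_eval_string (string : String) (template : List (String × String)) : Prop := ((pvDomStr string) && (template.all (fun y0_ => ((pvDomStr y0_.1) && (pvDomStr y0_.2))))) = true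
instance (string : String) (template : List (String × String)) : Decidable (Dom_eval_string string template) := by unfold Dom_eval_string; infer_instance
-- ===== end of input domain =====

-- B replaces A's per-character state machine by a partition-based chunk loop (objective: idiomatic; same results).

-- shared helper: get_value is textually identical in A's module and in B.
-- template values are strings, so the isinstance-dict branch never fires and the
-- Python loop always returns within its first iteration; dict lookup = first match.
def get_value (metadata : List (String × String)) (keys : String) : String :=
  match (PySem.Str.split? keys ".").getD [] with   -- keys.split('.'); sep ≠ "" so never none
  | [] => ""   -- unreachable: str.split('.') is never empty (Python would fall through to None)
  | k :: _ =>
    match metadata.find? (fun p => p.1 == k) with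
    | none => ""       -- 'if key not in on: return '''
    | some p => p.2    -- 'return on[key]' (a string, never a dict)

-- ===== PORT A =====
-- the for-loop over the characters with state (ret, inB, key)
def evalA_loop (template : List (String × String)) :
    List Char → List Char → Bool → List Char → List Char
  | [], ret, _, _ => ret
  | c :: cs, ret, inB, key =>
    if c == '{' && !inB then evalA_loop template cs ret true key
    else if c == '}' && inB then
      evalA_loop template cs (ret ++ (get_value template (String.ofList key)).toList) false []
    else if inB then evalA_loop template cs ret inB (key ++ [c])
    else evalA_loop template cs (ret ++ [c]) inB key

def eval_string (string : String) (template : List (String × String)) : String :=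
  String.ofList (evalA_loop template string.toList [] false [])

-- ===== PORT B =====
-- rest.partition('{') = (takeWhile (· ≠ '{'), the separator at the head of dropWhile, its tail)
def evalB_go (template : List (String × String)) (cs : List Char) : List Char :=
  match h : cs.dropWhile (· ≠ '{') with
  | [] => cs.takeWhile (· ≠ '{')                  -- 'if not brace: break'
  | _ :: rest' =>
    match h2 : rest'.dropWhile (· ≠ '}') with
    | [] => cs.takeWhile (· ≠ '{')                -- 'if not close: break'
    | _ :: rest3 =>
      cs.takeWhile (· ≠ '{')
        ++ (get_value template (String.ofList (rest'.takeWhile (· ≠ '}')))).toList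
        ++ evalB_go template rest3
termination_by cs.length
decreasing_by
  have h1 : (cs.dropWhile (· ≠ '{')).length ≤ cs.length := cs.length_dropWhile_le _
  have h3 : (rest'.dropWhile (· ≠ '}')).length ≤ rest'.length := rest'.length_dropWhile_le _
  rw [h] at h1; rw [h2] at h3; simp at h1 h3; omega

def eval_string_alt (string : String) (template : List (String × String)) : String :=
  String.ofList (evalB_go template string.toList)

-- ===== PRECONDITION & SPEC =====
def Spec_eval_string (string : String) (template : List (String × String)) (out : String) : Prop := out = eval_string_alt string template
instance (string : String) (template : List (String × String)) (out : String) : Decidable (Spec_eval_string string template out) := by unfold Spec_eval_string; infer_instance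

-- ===== CLAIM (what is proved, stated in full; the proofs are below) =====
def Claim_equal_eval_string : Prop := ∀ (string : String) (template : List (String × String)), Dom_eval_string string template → Spec_eval_string string template (eval_string string template)

-- ===== LEMMAS AND PROOFS =====

-- literal phase of A: chars without '{' are copied to ret one by one
theorem evalA_lit (t : List (String × String)) (lit : List Char)
    (hl : ∀ c ∈ lit, c ≠ '{') :
    ∀ cs ret, evalA_loop t (lit ++ cs) ret false [] = evalA_loop t cs (ret ++ lit) false [] := by
  induction lit with
  | nil => simp
  | cons c l ih =>
    intro cs ret
    have hc : c ≠ '{' := hl c (by simp)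
    have hl' : ∀ c ∈ l, c ≠ '{' := fun x hx => hl x (by simp [hx])
    rw [List.cons_append,
      show evalA_loop t (c :: (l ++ cs)) ret false [] = evalA_loop t (l ++ cs) (ret ++ [c]) false []
        from by simp [evalA_loop, hc],
      ih hl']
    simp

-- key phase of A: chars without '}' are appended to key one by one
theorem evalA_key (t : List (String × String)) (ks : List Char)
    (hk : ∀ c ∈ ks, c ≠ '}') :
    ∀ cs ret key, evalA_loop t (ks ++ cs) ret true key = evalA_loop t cs ret true (key ++ ks) := by
  induction ks with
  | nil => simp
  | cons c l ih =>
    intro cs ret key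
    have hc : c ≠ '}' := hk c (by simp)
    have hk' : ∀ c ∈ l, c ≠ '}' := fun x hx => hk x (by simp [hx])
    rw [List.cons_append,
      show evalA_loop t (c :: (l ++ cs)) ret true key = evalA_loop t (l ++ cs) ret true (key ++ [c])
        from by simp [evalA_loop, hc],
      ih hk']
    simp

theorem evalA_eq_evalB_aux (t : List (String × String)) :
    ∀ n : Nat, ∀ cs : List Char, cs.length ≤ n →
      ∀ ret, evalA_loop t cs ret false [] = ret ++ evalB_go t cs := by
  intro n
  induction n with
  | zero =>
    intro cs hcs ret
    have hnil : cs = [] := by cases cs <;> simp_all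
    subst hnil
    simp [evalA_loop, evalB_go]
  | succ n ih =>
    intro cs hcs ret
    have hlitP : ∀ c ∈ cs.takeWhile (· ≠ '{'), c ≠ '{' := by
      intro c hc; simpa using List.mem_takeWhile_imp hc
    have hstep := evalA_lit t (cs.takeWhile (· ≠ '{')) hlitP (cs.dropWhile (· ≠ '{')) ret
    rw [List.takeWhile_append_dropWhile] at hstep
    rw [hstep, evalB_go]
    split
    next h =>
      rw [h]
      simp [evalA_loop]
    next b rest' h =>
      have hb : b = '{' := by
        have h0 := List.head?_dropWhile_not (p := fun c => decide (c ≠ '{')) (l := cs)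
        rw [h] at h0; simp at h0; exact h0
      have hkeyP : ∀ c ∈ rest'.takeWhile (· ≠ '}'), c ≠ '}' := by
        intro c hc; simpa using List.mem_takeWhile_imp hc
      have hstep2 := evalA_key t (rest'.takeWhile (· ≠ '}')) hkeyP
        (rest'.dropWhile (· ≠ '}')) (ret ++ cs.takeWhile (· ≠ '{')) []
      rw [List.takeWhile_append_dropWhile, List.nil_append] at hstep2
      rw [h, hb]
      have hopen : evalA_loop t ('{' :: rest') (ret ++ cs.takeWhile (· ≠ '{')) false [] =
          evalA_loop t rest' (ret ++ cs.takeWhile (· ≠ '{')) true [] := by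
        simp [evalA_loop]
      rw [hopen, hstep2]
      have hlen1 : rest'.length < cs.length := by
        have h1 : (cs.dropWhile (· ≠ '{')).length ≤ cs.length := cs.length_dropWhile_le _
        rw [h] at h1; simp at h1; omega
      split
      next h2 =>
        rw [h2]
        simp [evalA_loop]
      next b2 rest3 h2 =>
        have hb2 : b2 = '}' := by
          have h0 := List.head?_dropWhile_not (p := fun c => decide (c ≠ '}')) (l := rest')
          rw [h2] at h0; simp at h0; exact h0
        rw [h2, hb2]
        have hlen3 : rest3.length ≤ n := by
          have h3 : (rest'.dropWhile (· ≠ '}')).length ≤ rest'.length := rest'.length_dropWhile_le _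
          rw [h2] at h3; simp at h3; omega
        have hclose : evalA_loop t ('}' :: rest3) (ret ++ cs.takeWhile (· ≠ '{')) true
            (rest'.takeWhile (· ≠ '}')) =
            evalA_loop t rest3 (ret ++ cs.takeWhile (· ≠ '{')
              ++ (get_value t (String.ofList (rest'.takeWhile (· ≠ '}')))).toList) false [] := by
          simp [evalA_loop]
        rw [hclose, ih rest3 hlen3]
        simp

theorem evalA_eq_evalB (t : List (String × String)) (cs : List Char) (ret : List Char) :
    evalA_loop t cs ret false [] = ret ++ evalB_go t cs :=
  evalA_eq_evalB_aux t cs.length cs le_rfl ret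

-- ===== VERDICT (by name: the statement is the Claim_ definition above) =====
theorem eval_string_spec : Claim_equal_eval_string := by
  intro s t _
  unfold Spec_eval_string eval_string eval_string_alt
  rw [evalA_eq_evalB]; simp
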